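-- pv_equiv track=rewrite | github.com/Beeko/trading-app | src/data/news_feed.py | _categorize_benzinga
-- ===== SOURCE A (Python) =====
-- def _categorize_benzinga(channels: list) -> str:
--     """Map Benzinga channel names to normalized article categories."""
--     names = {c.get("name", "").lower() for c in channels}
--     if "earnings" in names:
--         return "earnings"
--     if any(k in names for k in ("m&a", "mergers-acquisitions", "merger")):
--         return "merger"
--     if any(k in names for k in ("government-regulation", "sec", "legal")):
--         return "regulation"
--     return "general"
-- ===== SOURCE B (Python) =====
-- _KEYWORD_RANK = {
--     "earnings": 0,
--     "m&a": 1,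
--     "mergers-acquisitions": 1,
--     "merger": 1,
--     "government-regulation": 2,
--     "sec": 2,
--     "legal": 2,
-- }
--
--
-- def _categorize_benzinga(channels: list) -> str:
--     """Map Benzinga channel names to normalized article categories."""
--     best = 3
--     for c in channels:
--         r = _KEYWORD_RANK.get(c.get("name", "").lower(), 3)
--         if r < best:
--             best = r
--     if best == 0:
--         return "earnings"
--     elif best == 1:
--         return "merger"
--     elif best == 2:
--         return "regulation"
--     return "general"
-- ===== Notes on version B (the rewrite author's own statement) =====
-- stated objective: alternative
-- what changed: Instead of building a set of all lowered names and scanning it with repeated membership tests per keyword group, B precomputes a keyword-to-priority-rank dict and makes one pass keeping the minimum rank seen, then maps the rank back to a category.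
import Mathlib
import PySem

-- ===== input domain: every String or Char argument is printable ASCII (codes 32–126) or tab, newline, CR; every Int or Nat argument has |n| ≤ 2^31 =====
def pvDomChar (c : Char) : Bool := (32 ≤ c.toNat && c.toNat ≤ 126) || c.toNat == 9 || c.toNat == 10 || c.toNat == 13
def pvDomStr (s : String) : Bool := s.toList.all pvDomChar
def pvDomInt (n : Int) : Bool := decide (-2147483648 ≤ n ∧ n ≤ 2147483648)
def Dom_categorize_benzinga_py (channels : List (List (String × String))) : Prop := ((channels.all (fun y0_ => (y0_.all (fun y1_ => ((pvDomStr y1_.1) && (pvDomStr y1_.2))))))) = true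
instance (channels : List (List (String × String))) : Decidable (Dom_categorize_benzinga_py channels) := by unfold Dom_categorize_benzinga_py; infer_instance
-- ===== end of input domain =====

-- B replaces A's set-of-names plus per-keyword-group membership scans by a keyword→rank
-- dictionary and a single min-rank pass; same result, different data structure (alternative).


-- ===== PORT A =====
def categorize_benzinga_py (channels : List (List (String × String))) : String :=
  let names : PySem.Set String :=
    PySem.Set.ofList (channels.map (fun c =>
      PySem.Str.lower (PySem.Dict.getD (PySem.Dict.mk c) "name" "")))
  if names.contains "earnings" then "earnings"
  else if ["m&a", "mergers-acquisitions", "merger"].any (fun k => names.contains k) then "merger"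
  else if ["government-regulation", "sec", "legal"].any (fun k => names.contains k) then "regulation"
  else "general"

-- ===== PORT B =====
-- the module-level _KEYWORD_RANK dict
def keywordRank : PySem.Dict String Int :=
  PySem.Dict.mk [("earnings", 0), ("m&a", 1), ("mergers-acquisitions", 1), ("merger", 1),
                 ("government-regulation", 2), ("sec", 2), ("legal", 2)]

def categorize_benzinga_py_alt (channels : List (List (String × String))) : String :=
  let best : Int := channels.foldl (fun best c =>
    let r := PySem.Dict.getD keywordRank
      (PySem.Str.lower (PySem.Dict.getD (PySem.Dict.mk c) "name" "")) 3
    if r < best then r else best) 3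
  if best = 0 then "earnings"
  else if best = 1 then "merger"
  else if best = 2 then "regulation"
  else "general"

-- ===== PRECONDITION & SPEC =====
def Spec_categorize_benzinga_py (channels : List (List (String × String))) (out : String) : Prop := out = categorize_benzinga_py_alt channels
instance (channels : List (List (String × String))) (out : String) : Decidable (Spec_categorize_benzinga_py channels out) := by unfold Spec_categorize_benzinga_py; infer_instance

-- ===== CLAIM (what is proved, stated in full; the proofs are below) =====
def Claim_equal_categorize_benzinga_py : Prop := ∀ (channels : List (List (String × String))), Dom_categorize_benzinga_py channels → Spec_categorize_benzinga_py channels (categorize_benzinga_py channels)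

-- ===== LEMMAS AND PROOFS =====

-- the lowered name of a channel
def chName (c : List (String × String)) : String :=
  PySem.Str.lower (PySem.Dict.getD (PySem.Dict.mk c) "name" "")

theorem chName_def (c : List (String × String)) :
    PySem.Str.lower (PySem.Dict.getD (PySem.Dict.mk c) "name" "") = chName c := rfl

-- the minimal keyword rank present in a list of names, as an if-chain
def minRank (L : List String) : Int :=
  if "earnings" ∈ L then 0
  else if "m&a" ∈ L ∨ "mergers-acquisitions" ∈ L ∨ "merger" ∈ L then 1
  else if "government-regulation" ∈ L ∨ "sec" ∈ L ∨ "legal" ∈ L then 2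
  else 3

theorem rank_eq (s : String) :
    PySem.Dict.getD keywordRank s 3 =
      if s = "earnings" then 0
      else if s = "m&a" ∨ s = "mergers-acquisitions" ∨ s = "merger" then 1
      else if s = "government-regulation" ∨ s = "sec" ∨ s = "legal" then 2
      else 3 := by
  simp only [keywordRank, PySem.Dict.getD_eq_get?_getD, PySem.Dict.get?_mk_cons, beq_iff_eq]
  by_cases h1 : s = "earnings" <;> by_cases h2 : s = "m&a" <;>
    by_cases h3 : s = "mergers-acquisitions" <;> by_cases h4 : s = "merger" <;>
    by_cases h5 : s = "government-regulation" <;> by_cases h6 : s = "sec" <;>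
    by_cases h7 : s = "legal" <;>
    simp_all [eq_comm, PySem.Dict.get?]

theorem rank_le_3 (s : String) : PySem.Dict.getD keywordRank s 3 ≤ 3 := by
  rw [rank_eq]; split_ifs <;> omega

theorem minRank_le (L : List String) : minRank L ≤ 3 := by
  unfold minRank; split_ifs <;> omega

theorem minRank_nonneg (L : List String) : 0 ≤ minRank L := by
  unfold minRank; split_ifs <;> omega

set_option maxHeartbeats 1000000 in
theorem min_rank_cons (s : String) (t : List String) :
    (if PySem.Dict.getD keywordRank s 3 < minRank t then PySem.Dict.getD keywordRank s 3
     else minRank t) = minRank (s :: t) := by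
  rw [rank_eq]
  simp only [minRank, List.mem_cons]
  split_ifs <;> first | rfl | omega | tauto

theorem foldl_minRank (chs : List (List (String × String))) :
    ∀ b : Int, b ≤ 3 →
      chs.foldl (fun best c =>
        let r := PySem.Dict.getD keywordRank (chName c) 3
        if r < best then r else best) b =
      (if minRank (chs.map chName) < b then minRank (chs.map chName) else b) := by
  induction chs with
  | nil =>
    intro b hb
    simp only [List.foldl_nil, List.map_nil, minRank, List.not_mem_nil, or_self, if_neg,
      not_false_iff]
    split_ifs <;> omega
  | cons c t ih =>
    intro b hb
    simp only [List.foldl_cons, List.map_cons]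
    have hr := rank_le_3 (chName c)
    have hx := min_rank_cons (chName c) (t.map chName)
    have hb' : (if PySem.Dict.getD keywordRank (chName c) 3 < b
        then PySem.Dict.getD keywordRank (chName c) 3 else b) ≤ 3 := by
      split_ifs <;> omega
    rw [ih _ hb', ← hx]
    split_ifs <;> omega

-- A's result, written through minRank of the lowered names
theorem a_eq (chs : List (List (String × String))) :
    categorize_benzinga_py chs =
      (if minRank (chs.map chName) = 0 then "earnings"
       else if minRank (chs.map chName) = 1 then "merger"
       else if minRank (chs.map chName) = 2 then "regulation"
       else "general") := by
  unfold categorize_benzinga_py minRank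
  simp only [chName_def, List.any_cons, List.any_nil, Bool.or_false, Bool.or_eq_true,
    PySem.Set.contains_iff, PySem.Set.mem_ofList]
  split_ifs <;> simp_all

-- ===== VERDICT (by name: the statement is the Claim_ definition above) =====
theorem categorize_benzinga_py_spec : Claim_equal_categorize_benzinga_py := by
  intro chs _
  show categorize_benzinga_py chs = categorize_benzinga_py_alt chs
  rw [a_eq]
  unfold categorize_benzinga_py_alt
  simp only [chName_def]
  rw [foldl_minRank chs 3 (by omega)]
  have h3 := minRank_le (chs.map chName)
  have h0 := minRank_nonneg (chs.map chName)
  split_ifs <;> first | rfl | omega
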